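-- pv_equiv track=rewrite | github.com/Marshal1101/DataStructure-Algorithm-Study | baekjoon/ImplementationQuestion2/082-16918-봄버맨.py | explode_bomb
-- ===== SOURCE A (Python) =====
-- def explode_bomb(time: int, board: list[list]):
--     ret = [b[:] for b in board]
--     r = len(board)
--     c = len(board[0])
--     for i in range(len(board)):
--         for j in range(len(board[0])):
--             if board[i][j] < time - 2:
--                 ret[i][j] = -1
--                 if i > 0: ret[i-1][j] = -1
--                 if i < r-1: ret[i+1][j] = -1
--                 if j > 0: ret[i][j-1] = -1
--                 if j < c-1: ret[i][j+1] = -1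
--     return ret
-- ===== SOURCE B (Python) =====
-- def explode_bomb(time: int, board: list[list]):
--     r = len(board)
--     c = len(board[0])
--
--     def boom(i, j):
--         return 0 <= i < r and 0 <= j < c and board[i][j] < time - 2
--
--     return [[-1 if (boom(i, j) or boom(i - 1, j) or boom(i + 1, j)
--                     or boom(i, j - 1) or boom(i, j + 1))
--              else board[i][j]
--              for j in range(c)]
--             for i in range(r)]
-- ===== Notes on version B (the rewrite author's own statement) =====
-- stated objective: alternative
-- what changed: B is a gather (pull) pass: each output cell is computed fresh from a 'self-or-in-bounds-neighbor explodes' predicate, instead of A's copy-then-scatter pass that writes -1 outward from each exploding cell.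
-- outside the precondition, e.g. on explode_bomb(10, [[5, 5], [5, 5, 5]]): A returns [[-1, -1], [-1, -1, 5]], B returns [[-1, -1], [-1, -1]]; on explode_bomb(5, [[], [0]]): A returns [[], [0]], B returns [[], []]
import Mathlib
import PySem

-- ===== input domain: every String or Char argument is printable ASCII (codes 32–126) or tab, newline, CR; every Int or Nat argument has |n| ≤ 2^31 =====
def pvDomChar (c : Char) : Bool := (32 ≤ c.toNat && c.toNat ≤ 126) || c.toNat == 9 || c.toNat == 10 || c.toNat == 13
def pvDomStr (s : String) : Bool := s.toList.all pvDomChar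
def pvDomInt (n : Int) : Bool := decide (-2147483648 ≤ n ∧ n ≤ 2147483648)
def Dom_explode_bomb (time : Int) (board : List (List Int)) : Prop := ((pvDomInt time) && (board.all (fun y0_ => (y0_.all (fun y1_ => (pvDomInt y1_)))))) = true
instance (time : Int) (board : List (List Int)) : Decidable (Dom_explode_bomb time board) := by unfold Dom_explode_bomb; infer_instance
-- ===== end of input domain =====

-- B is a gather (pull) pass computing each output cell from a self-or-neighbor-explodes
-- predicate, instead of A's copy-then-scatter pass; return values proved equal on
-- rectangular non-empty boards.

-- ===== PORT A =====
-- board[x][y] read (in-range on Pre_; 0 default is unreachable there)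
def cellA (m : List (List Int)) (x y : Nat) : Int := (m.getD x []).getD y 0

-- ret[i][j] = v  (in-range on Pre_)
def setCell (m : List (List Int)) (i j : Nat) (v : Int) : List (List Int) :=
  m.set i ((m.getD i []).set j v)

def explode_bomb (time : Int) (board : List (List Int)) : List (List Int) :=
  let r := board.length
  let c := (board.headD []).length
  (List.range r).foldl (fun ret i =>
    (List.range c).foldl (fun ret j =>
      if cellA board i j < time - 2 then
        let ret := setCell ret i j (-1)
        let ret := if 0 < i then setCell ret (i-1) j (-1) else ret
        let ret := if i < r-1 then setCell ret (i+1) j (-1) else ret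
        let ret := if 0 < j then setCell ret i (j-1) (-1) else ret
        let ret := if j < c-1 then setCell ret i (j+1) (-1) else ret
        ret
      else ret) ret) board

-- ===== PORT B =====
-- board[x][y] read (in-range wherever B evaluates it on Pre_)
def cellB (m : List (List Int)) (x y : Nat) : Int := (m.getD x []).getD y 0

-- boom(i, j): in-bounds and the cell explodes at this time
def boomB (time : Int) (board : List (List Int)) (r c : Nat) (i j : Int) : Bool :=
  decide (0 ≤ i) && decide (i < (r : Int)) && decide (0 ≤ j) && decide (j < (c : Int))
    && decide (cellB board i.toNat j.toNat < time - 2)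

def explode_bomb_alt (time : Int) (board : List (List Int)) : List (List Int) :=
  let r := board.length
  let c := (board.headD []).length
  (List.range r).map (fun (i : Nat) => (List.range c).map (fun (j : Nat) =>
    if boomB time board r c (i : Int) (j : Int)
        || boomB time board r c ((i : Int) - 1) (j : Int)
        || boomB time board r c ((i : Int) + 1) (j : Int)
        || boomB time board r c (i : Int) ((j : Int) - 1)
        || boomB time board r c (i : Int) ((j : Int) + 1)
    then (-1 : Int) else cellB board i j))

-- ===== PRECONDITION & SPEC =====
-- Pre_ excludes the empty board (board[0] raises IndexError in A) and ragged boards, on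
-- which A's behaviour is accidental and neither value is the specified one: rows shorter
-- than row 0 make A raise IndexError reading or writing past the end, and on rows longer
-- than row 0 the cells beyond column len(board[0])-1 lie outside the r x c grid the loops
-- operate on — A happens to copy them through untouched, B's fresh r x c grid drops them;
-- both are defensible for malformed input (see the cites in claim.json).
def Pre_explode_bomb (time : Int) (board : List (List Int)) : Prop :=
  board ≠ [] ∧ ∀ row ∈ board, row.length = (board.headD []).length
instance (time : Int) (board : List (List Int)) : Decidable (Pre_explode_bomb time board) := by unfold Pre_explode_bomb; infer_instance

def pvWitness_explode_bomb : Int × List (List Int) := (3, [[0, 3], [3, 3]])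

def Spec_explode_bomb (time : Int) (board : List (List Int)) (out : List (List Int)) : Prop := out = explode_bomb_alt time board
instance (time : Int) (board : List (List Int)) (out : List (List Int)) : Decidable (Spec_explode_bomb time board out) := by unfold Spec_explode_bomb; infer_instance

-- ===== CLAIM (what is proved, stated in full; the proofs are below) =====
def Claim_equal_explode_bomb : Prop := ∀ (time : Int) (board : List (List Int)), Dom_explode_bomb time board → Pre_explode_bomb time board → Spec_explode_bomb time board (explode_bomb time board)

-- ===== LEMMAS AND PROOFS =====

-- the loop body of A, factored for the proof (definitionally the inner body of explode_bomb)
def stepF (time : Int) (board : List (List Int)) (r c : Nat)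
    (ret : List (List Int)) (p : Nat × Nat) : List (List Int) :=
  if cellA board p.1 p.2 < time - 2 then
    let ret := setCell ret p.1 p.2 (-1)
    let ret := if 0 < p.1 then setCell ret (p.1-1) p.2 (-1) else ret
    let ret := if p.1 < r-1 then setCell ret (p.1+1) p.2 (-1) else ret
    let ret := if 0 < p.2 then setCell ret p.1 (p.2-1) (-1) else ret
    let ret := if p.2 < c-1 then setCell ret p.1 (p.2+1) (-1) else ret
    ret
  else ret

-- "processing pair p writes -1 at (x,y)" as a Bool
def hitB (time : Int) (board : List (List Int)) (r c : Nat) (p : Nat × Nat) (x y : Nat) : Bool :=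
  decide (cellA board p.1 p.2 < time - 2) &&
  ( (decide (x = p.1) && decide (y = p.2))
  || (decide (0 < p.1) && decide (x = p.1 - 1) && decide (y = p.2))
  || (decide (p.1 < r - 1) && decide (x = p.1 + 1) && decide (y = p.2))
  || (decide (0 < p.2) && decide (x = p.1) && decide (y = p.2 - 1))
  || (decide (p.2 < c - 1) && decide (x = p.1) && decide (y = p.2 + 1)) )

theorem foldl_flatMap {α β γ : Type} (f : γ → α → γ) (g : β → List α) (l : List β) (init : γ) :
    (l.flatMap g).foldl f init = l.foldl (fun acc b => (g b).foldl f acc) init := by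
  induction l generalizing init with
  | nil => rfl
  | cons b l ih => simp [List.foldl_append, ih]

theorem explode_bomb_eq_foldl (time : Int) (board : List (List Int)) :
    explode_bomb time board =
      ((List.range board.length).flatMap
        (fun i => (List.range (board.headD []).length).map (fun j => (i, j)))).foldl
        (stepF time board board.length (board.headD []).length) board := by
  rw [foldl_flatMap]
  simp only [List.foldl_map]
  rfl

theorem length_setCell (m : List (List Int)) (i j : Nat) (v : Int) :
    (setCell m i j v).length = m.length := by
  simp [setCell]

theorem getD_set {α : Type} (l : List α) (i x : Nat) (v d : α) :
    (l.set i v).getD x d = if x = i ∧ i < l.length then v else l.getD x d := by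
  simp only [List.getD_eq_getElem?_getD, List.getElem?_set]
  split_ifs with h1 h2 h3 <;> simp_all

theorem getD_setCell (m : List (List Int)) (i j x : Nat) (v : Int) :
    (setCell m i j v).getD x [] =
      if x = i ∧ i < m.length then (m.getD i []).set j v else m.getD x [] := by
  unfold setCell
  rw [getD_set]

theorem rowlen_setCell (m : List (List Int)) (i j x : Nat) (v : Int) :
    ((setCell m i j v).getD x []).length = (m.getD x []).length := by
  rw [getD_setCell]
  split_ifs with h
  · rw [h.1]; simp
  · rfl

theorem cell_setCell (m : List (List Int)) (i j x y : Nat) (v : Int) :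
    cellA (setCell m i j v) x y =
      if x = i ∧ y = j ∧ i < m.length ∧ j < (m.getD i []).length then v
      else cellA m x y := by
  unfold cellA
  rw [getD_setCell]
  by_cases h1 : x = i ∧ i < m.length
  · rw [if_pos h1, getD_set, h1.1]
    split_ifs <;> first | rfl | tauto
  · rw [if_neg h1, if_neg (fun h => h1 ⟨h.1, h.2.2.1⟩)]

theorem length_ite_setCell (b : Prop) [Decidable b] (m : List (List Int)) (i j : Nat) (v : Int) :
    (if b then setCell m i j v else m).length = m.length := by
  split_ifs with h
  · exact length_setCell m i j v
  · rfl

theorem rowlen_ite_setCell (b : Prop) [Decidable b] (m : List (List Int)) (i j x : Nat) (v : Int) :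
    ((if b then setCell m i j v else m).getD x []).length = (m.getD x []).length := by
  split_ifs with h
  · exact rowlen_setCell m i j x v
  · rfl

theorem cell_ite_setCell (b : Prop) [Decidable b] (m : List (List Int)) (i j x y : Nat) (v : Int) :
    cellA (if b then setCell m i j v else m) x y =
      if b ∧ x = i ∧ y = j ∧ i < m.length ∧ j < (m.getD i []).length then v
      else cellA m x y := by
  split_ifs with hb h1 h2 <;> first
  | (rw [cell_setCell]; split_ifs <;> tauto)
  | rfl
  | tauto

theorem stepF_length (time : Int) (board : List (List Int)) (r c : Nat)
    (m : List (List Int)) (p : Nat × Nat) :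
    (stepF time board r c m p).length = m.length := by
  unfold stepF
  split_ifs <;> simp only [length_setCell]

theorem stepF_rowlen (time : Int) (board : List (List Int)) (r c : Nat)
    (m : List (List Int)) (p : Nat × Nat) (x : Nat) :
    ((stepF time board r c m p).getD x []).length = ((m.getD x []).length) := by
  unfold stepF
  split_ifs <;> simp only [rowlen_setCell]

theorem cell_stepF (time : Int) (board : List (List Int)) (r c : Nat)
    (m : List (List Int)) (i j x y : Nat)
    (hm : m.length = r)
    (hrow : ∀ z, (m.getD z []).length = if z < r then c else 0)
    (hi : i < r) (hj : j < c) (hx : x < r) (hy : y < c) :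
    cellA (stepF time board r c m (i, j)) x y =
      if hitB time board r c (i, j) x y = true then -1 else cellA m x y := by
  by_cases hcond : cellA board i j < time - 2
  · simp only [stepF, hitB, hcond, if_true, decide_true, Bool.true_and,
      cell_ite_setCell, cell_setCell, length_ite_setCell, length_setCell,
      rowlen_ite_setCell, rowlen_setCell, hm, hrow,
      Bool.or_eq_true, Bool.and_eq_true, decide_eq_true_eq]
    split_ifs <;> first | rfl | omega
  · simp [stepF, hitB, hcond]

theorem foldl_stepF_spec (time : Int) (board : List (List Int)) (r c : Nat)
    (pairs : List (Nat × Nat)) (hpairs : ∀ p ∈ pairs, p.1 < r ∧ p.2 < c) :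
    ∀ m : List (List Int), m.length = r →
      (∀ z, (m.getD z []).length = if z < r then c else 0) →
      (pairs.foldl (stepF time board r c) m).length = r ∧
      (∀ z, ((pairs.foldl (stepF time board r c) m).getD z []).length = if z < r then c else 0) ∧
      ∀ x y, x < r → y < c →
        cellA (pairs.foldl (stepF time board r c) m) x y =
          if pairs.any (fun p => hitB time board r c p x y) then -1 else cellA m x y := by
  induction pairs with
  | nil => intro m hm hrow; exact ⟨hm, hrow, fun x y _ _ => by simp⟩
  | cons p pairs ih =>
    obtain ⟨pi, pj⟩ := p
    intro m hm hrow
    have hp := hpairs (pi, pj) (List.mem_cons_self ..)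
    have hpairs' : ∀ q ∈ pairs, q.1 < r ∧ q.2 < c := fun q hq => hpairs q (List.mem_cons_of_mem _ hq)
    have hm' : (stepF time board r c m (pi, pj)).length = r := by rw [stepF_length, hm]
    have hrow' : ∀ z, ((stepF time board r c m (pi, pj)).getD z []).length = if z < r then c else 0 := by
      intro z; rw [stepF_rowlen]; exact hrow z
    obtain ⟨h1, h2, h3⟩ := ih hpairs' (stepF time board r c m (pi, pj)) hm' hrow'
    refine ⟨by simpa using h1, by simpa using h2, ?_⟩
    intro x y hx hy
    simp only [List.foldl_cons]
    rw [h3 x y hx hy, cell_stepF time board r c m pi pj x y hm hrow hp.1 hp.2 hx hy]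
    cases hhb : hitB time board r c (pi, pj) x y <;>
      cases hA : pairs.any (fun p => hitB time board r c p x y) <;>
      simp [hhb, hA]



theorem cellB_eq_cellA : cellB = cellA := rfl

theorem cellA_eq_getElem (m : List (List Int)) (x y : Nat)
    (h1 : x < m.length) (h2 : y < (m[x]).length) : cellA m x y = m[x][y] := by
  unfold cellA
  rw [List.getD_eq_getElem m [] h1, List.getD_eq_getElem _ 0 h2]

theorem any_hitB_eq (time : Int) (board : List (List Int)) (x y : Nat)
    (hx : x < board.length) (hy : y < (board.headD []).length) :
    (((List.range board.length).flatMap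
        (fun i => (List.range (board.headD []).length).map (fun j => (i, j)))).any
      (fun p => hitB time board board.length (board.headD []).length p x y))
    = (boomB time board board.length (board.headD []).length (x : Int) (y : Int)
       || boomB time board board.length (board.headD []).length ((x : Int) - 1) (y : Int)
       || boomB time board board.length (board.headD []).length ((x : Int) + 1) (y : Int)
       || boomB time board board.length (board.headD []).length (x : Int) ((y : Int) - 1)
       || boomB time board board.length (board.headD []).length (x : Int) ((y : Int) + 1)) := by
  rw [Bool.eq_iff_iff]
  simp only [List.any_eq_true, List.mem_flatMap, List.mem_map, List.mem_range,
    hitB, boomB, cellB_eq_cellA, Bool.and_eq_true, Bool.or_eq_true, decide_eq_true_eq]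
  constructor
  · rintro ⟨p, ⟨i, hi, j, hj, rfl⟩, hc, hw⟩
    rcases hw with ((((⟨hx1, hy1⟩ | ⟨⟨hi0, hx1⟩, hy1⟩) | ⟨⟨hir, hx1⟩, hy1⟩) |
      ⟨⟨hj0, hx1⟩, hy1⟩) | ⟨⟨hjc, hx1⟩, hy1⟩)
    · subst hx1; subst hy1
      refine Or.inl (Or.inl (Or.inl (Or.inl ⟨⟨⟨⟨by omega, by omega⟩, by omega⟩, by omega⟩, ?_⟩)))
      have e1 : ((x : Int)).toNat = x := by omega
      have e2 : ((y : Int)).toNat = y := by omega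
      rw [e1, e2]; exact hc
    · subst hy1
      have hix : i = x + 1 := by omega
      subst hix
      refine Or.inl (Or.inl (Or.inr ⟨⟨⟨⟨by omega, by omega⟩, by omega⟩, by omega⟩, ?_⟩))
      have e1 : ((x : Int) + 1).toNat = x + 1 := by omega
      have e2 : ((y : Int)).toNat = y := by omega
      rw [e1, e2]; exact hc
    · subst hy1
      refine Or.inl (Or.inl (Or.inl (Or.inr ⟨⟨⟨⟨by omega, by omega⟩, by omega⟩, by omega⟩, ?_⟩)))
      have e1 : ((x : Int) - 1).toNat = i := by omega
      have e2 : ((y : Int)).toNat = y := by omega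
      rw [e1, e2]; exact hc
    · subst hx1
      have hjy : j = y + 1 := by omega
      subst hjy
      refine Or.inr ⟨⟨⟨⟨by omega, by omega⟩, by omega⟩, by omega⟩, ?_⟩
      have e1 : ((x : Int)).toNat = x := by omega
      have e2 : ((y : Int) + 1).toNat = y + 1 := by omega
      rw [e1, e2]; exact hc
    · subst hx1
      refine Or.inl (Or.inr ⟨⟨⟨⟨by omega, by omega⟩, by omega⟩, by omega⟩, ?_⟩)
      have e1 : ((x : Int)).toNat = x := by omega
      have e2 : ((y : Int) - 1).toNat = j := by omega
      rw [e1, e2]; exact hc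
  · rintro (((((⟨⟨⟨⟨b1, b2⟩, b3⟩, b4⟩, hc⟩ | ⟨⟨⟨⟨b1, b2⟩, b3⟩, b4⟩, hc⟩) |
      ⟨⟨⟨⟨b1, b2⟩, b3⟩, b4⟩, hc⟩) | ⟨⟨⟨⟨b1, b2⟩, b3⟩, b4⟩, hc⟩) | ⟨⟨⟨⟨b1, b2⟩, b3⟩, b4⟩, hc⟩))
    · refine ⟨(x, y), ⟨x, hx, y, hy, rfl⟩, ?_, Or.inl (Or.inl (Or.inl (Or.inl ⟨rfl, rfl⟩)))⟩
      have e1 : ((x : Int)).toNat = x := by omega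
      have e2 : ((y : Int)).toNat = y := by omega
      rw [e1, e2] at hc; exact hc
    · refine ⟨(x - 1, y), ⟨x - 1, by omega, y, hy, rfl⟩, ?_,
        Or.inl (Or.inl (Or.inr ⟨⟨by omega, by omega⟩, rfl⟩))⟩
      have e1 : ((x : Int) - 1).toNat = x - 1 := by omega
      have e2 : ((y : Int)).toNat = y := by omega
      rw [e1, e2] at hc; exact hc
    · refine ⟨(x + 1, y), ⟨x + 1, by omega, y, hy, rfl⟩, ?_,
        Or.inl (Or.inl (Or.inl (Or.inr ⟨⟨by omega, by omega⟩, rfl⟩)))⟩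
      have e1 : ((x : Int) + 1).toNat = x + 1 := by omega
      have e2 : ((y : Int)).toNat = y := by omega
      rw [e1, e2] at hc; exact hc
    · refine ⟨(x, y - 1), ⟨x, hx, y - 1, by omega, rfl⟩, ?_,
        Or.inr ⟨⟨by omega, rfl⟩, by omega⟩⟩
      have e1 : ((x : Int)).toNat = x := by omega
      have e2 : ((y : Int) - 1).toNat = y - 1 := by omega
      rw [e1, e2] at hc; exact hc
    · refine ⟨(x, y + 1), ⟨x, hx, y + 1, by omega, rfl⟩, ?_,
        Or.inl (Or.inr ⟨⟨by omega, rfl⟩, by omega⟩)⟩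
      have e1 : ((x : Int)).toNat = x := by omega
      have e2 : ((y : Int) + 1).toNat = y + 1 := by omega
      rw [e1, e2] at hc; exact hc

theorem explode_bomb_spec : Claim_equal_explode_bomb := by
  intro time board _ hpre
  unfold Spec_explode_bomb
  obtain ⟨hne, hrect⟩ := hpre
  have hrow : ∀ z, (board.getD z []).length =
      if z < board.length then (board.headD []).length else 0 := by
    intro z
    split_ifs with hz
    · rw [List.getD_eq_getElem board [] hz]
      exact hrect _ (List.getElem_mem hz)
    · rw [List.getD_eq_default board [] (Nat.le_of_not_lt hz)]
      rfl
  have hpairs : ∀ p ∈ (List.range board.length).flatMap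
      (fun i => (List.range (board.headD []).length).map (fun j => (i, j))),
      p.1 < board.length ∧ p.2 < (board.headD []).length := by
    intro p hp
    simp only [List.mem_flatMap, List.mem_map, List.mem_range] at hp
    obtain ⟨i, hi, j, hj, rfl⟩ := hp
    exact ⟨hi, hj⟩
  obtain ⟨hL, hRow, hCell⟩ := foldl_stepF_spec time board board.length
    (board.headD []).length _ hpairs board rfl hrow
  rw [explode_bomb_eq_foldl]
  show _ = (List.range board.length).map (fun (i : Nat) => (List.range (board.headD []).length).map (fun (j : Nat) =>
    if boomB time board board.length (board.headD []).length (i : Int) (j : Int)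
        || boomB time board board.length (board.headD []).length ((i : Int) - 1) (j : Int)
        || boomB time board board.length (board.headD []).length ((i : Int) + 1) (j : Int)
        || boomB time board board.length (board.headD []).length (i : Int) ((j : Int) - 1)
        || boomB time board board.length (board.headD []).length (i : Int) ((j : Int) + 1)
    then (-1 : Int) else cellB board i j))
  apply List.ext_getElem
  · simpa using hL
  · intro x h1 h2
    have hx : x < board.length := by simpa using h2
    rw [List.getElem_map, List.getElem_range]
    have hlrow := hRow x
    rw [if_pos hx, List.getD_eq_getElem _ [] h1] at hlrow
    apply List.ext_getElem
    · simpa using hlrow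
    · intro y hy1 hy2
      have hy : y < (board.headD []).length := by simpa using hy2
      rw [List.getElem_map, List.getElem_range]
      have hcell := hCell x y hx hy
      rw [any_hitB_eq time board x y hx hy] at hcell
      rw [cellB_eq_cellA, ← cellA_eq_getElem _ x y h1 hy1, hcell]
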